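-- pv_equiv track=rewrite | github.com/andyyvo/CS131 | ps6/ps6.py | do_parts_cover_set
-- ===== SOURCE A (Python) =====
-- def do_parts_contain_element(x, p):
--     """ returns True iff the element 'x'
--         is an element of some element 'p'.
--     """
--     for a in range(len(p)):
--         if x in p[a]:
--             return True
--     return False
--
-- def do_parts_cover_set(s, p):
--     """ returns True iff every element of 's'
--         is in some element of 'p'.
--     """
--     total = len(s)
--     count = 0
--     for i in s:
--         if do_parts_contain_element(i,p):
--             count += 1
--     if count == total:
--         return True
--     else:
--         return False
-- ===== SOURCE B (Python) =====
-- def do_parts_cover_set(s, p):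
--     """ returns True iff every element of 's'
--         is in some element of 'p'.
--     """
--     remaining = list(s)
--     for part in p:
--         remaining = [x for x in remaining if x not in part]
--         if not remaining:
--             return True
--     return not remaining
-- ===== Notes on version B (the rewrite author's own statement) =====
-- stated objective: alternative
-- what changed: Inverts the loop nesting: instead of scanning all parts for each element and counting covered elements, B iterates over the parts once, maintaining a shrinking worklist of not-yet-covered elements and returning early when it empties.
import Mathlib
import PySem

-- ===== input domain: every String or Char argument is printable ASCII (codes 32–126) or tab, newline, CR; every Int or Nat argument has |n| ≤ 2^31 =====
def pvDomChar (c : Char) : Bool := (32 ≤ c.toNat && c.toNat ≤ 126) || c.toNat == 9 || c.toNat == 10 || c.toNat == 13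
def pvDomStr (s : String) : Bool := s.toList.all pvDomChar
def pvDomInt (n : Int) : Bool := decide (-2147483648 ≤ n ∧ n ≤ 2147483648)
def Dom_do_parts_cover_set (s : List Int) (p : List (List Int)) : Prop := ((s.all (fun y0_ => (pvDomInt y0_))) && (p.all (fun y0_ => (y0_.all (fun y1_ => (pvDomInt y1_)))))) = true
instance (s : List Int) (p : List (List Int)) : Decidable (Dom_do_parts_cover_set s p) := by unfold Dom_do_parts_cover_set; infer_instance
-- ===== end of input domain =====

-- B inverts the loop nesting: parts outer, maintaining a shrinking worklist of uncovered
-- elements with an early exit, instead of counting covered elements per-element (alternative).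

-- ===== PORT A =====
-- for a in range(len(p)): if x in p[a]: return True / return False
def do_parts_contain_element (x : Int) (p : List (List Int)) : Bool :=
  match p with
  | [] => false
  | a :: rest => if x ∈ a then true else do_parts_contain_element x rest

def do_parts_cover_set (s : List Int) (p : List (List Int)) : Bool :=
  let total := s.length
  let count := s.foldl (fun count i => if do_parts_contain_element i p then count + 1 else count) 0
  if count = total then true else false

-- ===== PORT B =====
-- remaining = list(s); for part in p: remaining = [x for x in remaining if x not in part];
--   if not remaining: return True
-- return not remaining
def pvAltLoop (remaining : List Int) (p : List (List Int)) : Bool :=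
  match p with
  | [] => remaining.isEmpty
  | part :: rest =>
    let remaining' := remaining.filter (fun x => !(part.contains x))
    if remaining'.isEmpty then true else pvAltLoop remaining' rest

def do_parts_cover_set_alt (s : List Int) (p : List (List Int)) : Bool :=
  pvAltLoop s p

-- ===== PRECONDITION & SPEC =====
def Spec_do_parts_cover_set (s : List Int) (p : List (List Int)) (out : Bool) : Prop := out = do_parts_cover_set_alt s p
instance (s : List Int) (p : List (List Int)) (out : Bool) : Decidable (Spec_do_parts_cover_set s p out) := by unfold Spec_do_parts_cover_set; infer_instance

-- ===== CLAIM (what is proved, stated in full; the proofs are below) =====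
def Claim_equal_do_parts_cover_set : Prop := ∀ (s : List Int) (p : List (List Int)), Dom_do_parts_cover_set s p → Spec_do_parts_cover_set s p (do_parts_cover_set s p)

-- ===== LEMMAS AND PROOFS =====

theorem contain_eq_any (x : Int) (p : List (List Int)) :
    do_parts_contain_element x p = p.any (fun part => part.contains x) := by
  induction p with
  | nil => rfl
  | cons a rest ih =>
    simp only [do_parts_contain_element, List.any_cons, ih]
    by_cases h : x ∈ a
    · simp [h]
    · simp [h]

theorem foldl_count (f : Int → Bool) (s : List Int) (n : Nat) :
    s.foldl (fun count i => if f i then count + 1 else count) n = n + s.countP f := by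
  induction s generalizing n with
  | nil => simp
  | cons a t ih =>
    by_cases h : f a
    · simp [List.foldl_cons, h, ih]; omega
    · simp [List.foldl_cons, h, ih]

theorem portA_eq_all (s : List Int) (p : List (List Int)) :
    do_parts_cover_set s p = s.all (fun x => p.any (fun part => part.contains x)) := by
  have key : (s.countP fun i => do_parts_contain_element i p) = s.length ↔
      (s.all fun x => p.any fun part => part.contains x) = true := by
    rw [List.countP_eq_length, List.all_eq_true]
    constructor
    · intro h x hx; rw [← contain_eq_any]; exact h x hx
    · intro h x hx; rw [contain_eq_any]; exact h x hx
  unfold do_parts_cover_set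
  simp only [foldl_count, Nat.zero_add]
  by_cases h : (s.countP fun i => do_parts_contain_element i p) = s.length
  · rw [if_pos h]; exact (key.mp h).symm
  · rw [if_neg h]
    cases hall : s.all (fun x => p.any fun part => part.contains x)
    · rfl
    · exact absurd (key.mpr hall) h

theorem all_or_filter (f g : Int → Bool) (r : List Int) :
    r.all (fun x => f x || g x) = (r.filter (fun x => !(f x))).all g := by
  induction r with
  | nil => rfl
  | cons a t ih =>
    cases h : f a with
    | true =>
      have h1 : List.filter (fun x => !(f x)) (a :: t) = List.filter (fun x => !(f x)) t := by
        simp [List.filter_cons, h]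
      rw [h1, ← ih, List.all_cons, h, Bool.true_or, Bool.true_and]
    | false =>
      have h1 : List.filter (fun x => !(f x)) (a :: t) = a :: List.filter (fun x => !(f x)) t := by
        simp [List.filter_cons, h]
      rw [h1, List.all_cons, List.all_cons, ← ih, h, Bool.false_or]

theorem altLoop_eq_all (p : List (List Int)) (r : List Int) :
    pvAltLoop r p = r.all (fun x => p.any (fun part => part.contains x)) := by
  induction p generalizing r with
  | nil => cases r <;> simp [pvAltLoop]
  | cons part rest ih =>
    show (if (r.filter (fun x => !(part.contains x))).isEmpty then true
          else pvAltLoop (r.filter (fun x => !(part.contains x))) rest) = _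
    simp only [List.any_cons]
    rw [all_or_filter (fun x => part.contains x) (fun x => rest.any (fun q => q.contains x)) r,
      ih]
    by_cases he : (r.filter (fun x => !(part.contains x))).isEmpty
    · rw [if_pos he, List.isEmpty_iff.mp he]
      rfl
    · rw [if_neg he]

-- ===== VERDICT (by name: the statement is the Claim_ definition above) =====
theorem do_parts_cover_set_spec : Claim_equal_do_parts_cover_set := by
  intro s p _
  unfold Spec_do_parts_cover_set do_parts_cover_set_alt
  rw [portA_eq_all, altLoop_eq_all]
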